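-- pv_equiv track=rewrite | github.com/xtofuub/openrecon-ios | skills/hardening-windows-endpoint-with-cis-benchmark/scripts/process.py | categorize_findings_by_section
-- ===== SOURCE A (Python) =====
-- from collections import defaultdict
--
-- def categorize_findings_by_section(findings: list) -> dict:
--     """Group failed findings by CIS benchmark section for prioritized remediation."""
--     sections = defaultdict(list)
--
--     section_map = {
--         "1.1": "Password Policy",
--         "1.2": "Account Lockout Policy",
--         "2.2": "User Rights Assignment",
--         "2.3": "Security Options",
--         "5": "System Services",
--         "9": "Windows Firewall",
--         "17": "Advanced Audit Policy",
--         "18": "Administrative Templates",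
--         "19": "Administrative Templates (User)",
--     }
--
--     for finding in findings:
--         rule_id = finding["rule_id"]
--         categorized = False
--         for prefix, section_name in section_map.items():
--             if f"_section_{prefix}" in rule_id.lower() or f".{prefix}." in rule_id:
--                 sections[section_name].append(finding)
--                 categorized = True
--                 break
--         if not categorized:
--             sections["Other"].append(finding)
--
--     return dict(sections)
-- ===== SOURCE B (Python) =====
-- def categorize_findings_by_section(findings: list) -> dict:
--     """Group failed findings by CIS benchmark section for prioritized remediation."""
--     rules = [
--         ("_section_1.1", ".1.1.", "Password Policy"),
--         ("_section_1.2", ".1.2.", "Account Lockout Policy"),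
--         ("_section_2.2", ".2.2.", "User Rights Assignment"),
--         ("_section_2.3", ".2.3.", "Security Options"),
--         ("_section_5", ".5.", "System Services"),
--         ("_section_9", ".9.", "Windows Firewall"),
--         ("_section_17", ".17.", "Advanced Audit Policy"),
--         ("_section_18", ".18.", "Administrative Templates"),
--         ("_section_19", ".19.", "Administrative Templates (User)"),
--     ]
--
--     def label(finding):
--         rid = finding["rule_id"]
--         low = rid.lower()
--         return next((name for a, b, name in rules if a in low or b in rid), "Other")
--
--     tagged = [(label(f), f) for f in findings]
--     order = list(dict.fromkeys(tag for tag, _ in tagged))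
--     return {tag: [f for t, f in tagged if t == tag] for tag in order}
-- ===== Notes on version B (the rewrite author's own statement) =====
-- stated objective: alternative
-- what changed: B precomputes the two search needles per section, labels every finding in one pass with a first-match search over that table, dedups the labels for the key order and builds each section by filtering the tagged list, instead of A's single pass that appends findings into a growing defaultdict keyed by a prefix loop with runtime f-string formatting.
import Mathlib
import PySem

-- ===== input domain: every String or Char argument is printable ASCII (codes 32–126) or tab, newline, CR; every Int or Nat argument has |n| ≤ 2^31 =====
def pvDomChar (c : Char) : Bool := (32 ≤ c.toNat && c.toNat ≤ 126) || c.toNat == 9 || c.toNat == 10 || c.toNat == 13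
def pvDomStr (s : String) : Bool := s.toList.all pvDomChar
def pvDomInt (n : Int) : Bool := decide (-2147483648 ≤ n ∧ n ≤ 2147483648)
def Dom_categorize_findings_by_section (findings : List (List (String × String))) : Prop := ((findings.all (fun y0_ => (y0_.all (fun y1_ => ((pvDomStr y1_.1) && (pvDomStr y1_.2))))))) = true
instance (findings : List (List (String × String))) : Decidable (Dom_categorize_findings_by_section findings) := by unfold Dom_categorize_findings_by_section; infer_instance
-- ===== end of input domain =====

-- B precomputes the two search needles per section, labels every finding in one pass with a
-- first-match table search, and rebuilds the grouped dict from the first-occurrence order of the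
-- labels by filtering, instead of A's pass appending into a growing defaultdict (alternative
-- decomposition, same cost class).

-- ===== PORT A =====
def pvSectionMapA : List (String × String) :=
  [("1.1", "Password Policy"), ("1.2", "Account Lockout Policy"), ("2.2", "User Rights Assignment"),
   ("2.3", "Security Options"), ("5", "System Services"), ("9", "Windows Firewall"),
   ("17", "Advanced Audit Policy"), ("18", "Administrative Templates"), ("19", "Administrative Templates (User)")]

-- inner 'for prefix, section_name in section_map.items(): … break' loop of A
def pvFindSectionA (rule_id : String) : List (String × String) → Option String
  | [] => none
  | (pre, name) :: rest =>
      if PySem.Str.isIn ("_section_" ++ pre) (PySem.Str.lower rule_id)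
         || PySem.Str.isIn ("." ++ pre ++ ".") rule_id
      then some name else pvFindSectionA rule_id rest

-- A's loop body for one finding (defaultdict append = insert of getD [] ++ [finding])
def pvStepA (sections : PySem.Dict String (List (List (String × String)))) (finding : List (String × String)) : PySem.Dict String (List (List (String × String))) :=
  match List.lookup "rule_id" finding with
  | none => sections   -- Python raises KeyError here; excluded by Pre_
  | some rule_id =>
      match pvFindSectionA rule_id pvSectionMapA with
      | some name => sections.insert name (sections.getD name [] ++ [finding])
      | none => sections.insert "Other" (sections.getD "Other" [] ++ [finding])

def categorize_findings_by_section (findings : List (List (String × String))) : List (String × List (List (String × String))) :=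
  (findings.foldl pvStepA PySem.Dict.empty).items

-- ===== PORT B =====
-- B's precomputed needle table: (lowercase needle, dotted needle, section name)
def pvRules : List (String × String × String) :=
  [("_section_1.1", ".1.1.", "Password Policy"),
   ("_section_1.2", ".1.2.", "Account Lockout Policy"),
   ("_section_2.2", ".2.2.", "User Rights Assignment"),
   ("_section_2.3", ".2.3.", "Security Options"),
   ("_section_5", ".5.", "System Services"),
   ("_section_9", ".9.", "Windows Firewall"),
   ("_section_17", ".17.", "Advanced Audit Policy"),
   ("_section_18", ".18.", "Administrative Templates"),
   ("_section_19", ".19.", "Administrative Templates (User)")]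

-- B's 'label' helper: next(...) over the rule table, default "Other"
def pvLabel (finding : List (String × String)) : String :=
  match List.lookup "rule_id" finding with
  | none => "Other"   -- Python B raises KeyError here; excluded by Pre_
  | some rid =>
      let low := PySem.Str.lower rid
      match pvRules.find? (fun r => PySem.Str.isIn r.1 low || PySem.Str.isIn r.2.1 rid) with
      | some r => r.2.2
      | none => "Other"

-- 'dict.fromkeys' keeps the first occurrence of each tag = dedup
def categorize_findings_by_section_alt (findings : List (List (String × String))) : List (String × List (List (String × String))) :=
  let tagged := findings.map (fun f => (pvLabel f, f))
  let order := PySem.List.dedup (tagged.map Prod.fst)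
  order.map (fun tag => (tag, (tagged.filter (fun p => p.1 == tag)).map Prod.snd))

-- ===== PRECONDITION & SPEC =====
-- Pre_ excludes findings without a "rule_id" key, on which both A and B raise KeyError.
def Pre_categorize_findings_by_section (findings : List (List (String × String))) : Prop :=
  findings.all (fun f => (List.lookup "rule_id" f).isSome) = true
instance (findings : List (List (String × String))) : Decidable (Pre_categorize_findings_by_section findings) := by unfold Pre_categorize_findings_by_section; infer_instance

def pvWitness_categorize_findings_by_section : (List (List (String × String))) :=
  [[("rule_id", "x_Section_1.1_pw")], [("rule_id", "abc.5.def")], [("rule_id", "nothing")]]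

def Spec_categorize_findings_by_section (findings : List (List (String × String))) (out : List (String × List (List (String × String)))) : Prop := out = categorize_findings_by_section_alt findings
instance (findings : List (List (String × String))) (out : List (String × List (List (String × String)))) : Decidable (Spec_categorize_findings_by_section findings out) := by unfold Spec_categorize_findings_by_section; infer_instance

-- ===== CLAIM (what is proved, stated in full; the proofs are below) =====
def Claim_equal_categorize_findings_by_section : Prop := ∀ (findings : List (List (String × String))), Dom_categorize_findings_by_section findings → Pre_categorize_findings_by_section findings → Spec_categorize_findings_by_section findings (categorize_findings_by_section findings)

-- ===== LEMMAS AND PROOFS =====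

-- B's table search and A's inner prefix loop compute the same label for every rule id
-- pvRules is exactly A's section map with the needles precomputed
theorem pvRules_eq : pvRules = pvSectionMapA.map (fun q => ("_section_" ++ q.1, ("." ++ q.1 ++ ".", q.2))) := rfl

-- A's inner prefix loop is the first match over the needle table
theorem pvFindGen (rid : String) : ∀ (m : List (String × String)),
    pvFindSectionA rid m
      = ((m.map (fun q => ("_section_" ++ q.1, ("." ++ q.1 ++ ".", q.2)))).find?
          (fun r => PySem.Str.isIn r.1 (PySem.Str.lower rid) || PySem.Str.isIn r.2.1 rid)).map (fun r => r.2.2)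
  | [] => rfl
  | (pre, name) :: rest => by
      simp only [List.map_cons, List.find?_cons, pvFindSectionA]
      cases hc : (PySem.Str.isIn ("_section_" ++ pre) (PySem.Str.lower rid)
          || PySem.Str.isIn ("." ++ pre ++ ".") rid)
      · simp only [Bool.false_eq_true, reduceIte]
        exact pvFindGen rid rest
      · simp only [reduceIte, Option.map_some]

theorem pvStepA_eq (d : PySem.Dict String (List (List (String × String)))) (f : List (String × String))
    (h : (List.lookup "rule_id" f).isSome) :
    pvStepA d f = d.insert (pvLabel f) (d.getD (pvLabel f) [] ++ [f]) := by
  obtain ⟨rid, hr⟩ := Option.isSome_iff_exists.mp h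
  have hfa : pvFindSectionA rid pvSectionMapA
      = (pvRules.find? (fun r => PySem.Str.isIn r.1 (PySem.Str.lower rid) || PySem.Str.isIn r.2.1 rid)).map (fun r => r.2.2) := by
    rw [pvRules_eq]; exact pvFindGen rid pvSectionMapA
  simp only [pvStepA, pvLabel, hr, hfa]
  cases pvRules.find? (fun r => PySem.Str.isIn r.1 (PySem.Str.lower rid) || PySem.Str.isIn r.2.1 rid) <;> simp

-- the per-label selection B performs
def pvSel (fs : List (List (String × String))) (lab : String) : List (List (String × String)) :=
  fs.filter (fun f => pvLabel f == lab)

-- B's result in closed form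
def pvOut (fs : List (List (String × String))) : List (String × List (List (String × String))) :=
  (PySem.List.dedup (fs.map pvLabel)).map (fun lab => (lab, pvSel fs lab))

theorem pvTagFilter (fs : List (List (String × String))) (lab : String) :
    (((fs.map (fun f => (pvLabel f, f))).filter (fun p => p.1 == lab)).map Prod.snd) = pvSel fs lab := by
  induction fs with
  | nil => rfl
  | cons f rest ih =>
      simp only [List.map_cons, List.filter_cons, pvSel]
      by_cases hc : pvLabel f == lab <;> simp [hc, pvSel] at ih ⊢ <;> simp [ih]

theorem pvAlt_eq (fs : List (List (String × String))) :
    categorize_findings_by_section_alt fs = pvOut fs := by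
  simp only [categorize_findings_by_section_alt, pvOut, List.map_map, Function.comp_def]
  exact List.map_congr_left (fun lab _ => by rw [pvTagFilter])

theorem pvFindBeqMem {l : List String} {k : String} (h : k ∈ l) :
    l.find? (fun x => x == k) = some k := by
  induction l with
  | nil => cases h
  | cons a rest ih =>
      by_cases ha : a = k
      · simp [List.find?, ha]
      · have hb : (a == k) = false := by simp [ha]
        have hm : k ∈ rest := by cases h with
          | head => exact absurd rfl ha
          | tail _ h' => exact h'
        simp [List.find?, hb, ih hm]

theorem pvFindBeqNotMem {l : List String} {k : String} (h : k ∉ l) :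
    l.find? (fun x => x == k) = none := by
  apply List.find?_eq_none.mpr
  intro x hx
  simp only [beq_iff_eq]
  exact fun he => h (he ▸ hx)

theorem pvFindMap (l : List String) (g : String → List (List (String × String))) (k : String) :
    ((l.map (fun x => (x, g x))).find? (fun p => p.1 == k))
      = (l.find? (fun x => x == k)).map (fun x => (x, g x)) := by
  induction l with
  | nil => rfl
  | cons a rest ih =>
      by_cases ha : a == k <;> simp [List.find?, ha, ih]

theorem pvGet?_out (fs : List (List (String × String))) (k : String) :
    (PySem.Dict.mk (pvOut fs)).get? k
      = if k ∈ fs.map pvLabel then some (pvSel fs k) else none := by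
  simp only [PySem.Dict.get?, pvOut, pvFindMap]
  by_cases hk : k ∈ fs.map pvLabel
  · rw [pvFindBeqMem ((PySem.List.mem_dedup _ _).mpr hk)]; simp [hk]
  · rw [pvFindBeqNotMem (fun hm => hk ((PySem.List.mem_dedup _ _).mp hm))]; simp [hk]

theorem pvContains_out (fs : List (List (String × String))) (k : String) :
    (PySem.Dict.mk (pvOut fs)).contains k = (k ∈ fs.map pvLabel : Bool) := by
  simp only [PySem.Dict.contains, pvOut, List.any_map, Function.comp_def]
  by_cases hk : k ∈ fs.map pvLabel
  · simp only [hk, decide_true]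
    exact List.any_eq_true.mpr ⟨k, (PySem.List.mem_dedup _ _).mpr hk, by simp⟩
  · simp only [hk, decide_false]
    apply List.any_eq_false.mpr
    intro lab hlab
    have hne : lab ≠ k := fun he => hk (he ▸ (PySem.List.mem_dedup _ _).mp hlab)
    simp [hne]

theorem pvDedup_append (xs : List String) (x : String) :
    PySem.List.dedup (xs ++ [x]) = if x ∈ xs then PySem.List.dedup xs else PySem.List.dedup xs ++ [x] := by
  rw [PySem.List.dedup_eq_ofList (xs ++ [x]), PySem.Set.ofList_eq_foldl, List.foldl_append,
      List.foldl_cons, List.foldl_nil, ← PySem.Set.ofList_eq_foldl]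
  by_cases hx : x ∈ xs <;>
    simp [PySem.Set.add, PySem.Set.contains, hx, PySem.Set.mem_ofList, PySem.List.dedup_eq_ofList]

theorem pvSel_append (fs : List (List (String × String))) (f : List (String × String)) (lab : String) :
    pvSel (fs ++ [f]) lab = pvSel fs lab ++ (if pvLabel f == lab then [f] else []) := by
  unfold pvSel
  rw [List.filter_append]
  congr 1
  by_cases hc : pvLabel f == lab <;> simp [hc]

theorem pvSel_nil_of_not_mem {fs : List (List (String × String))} {k : String}
    (h : k ∉ fs.map pvLabel) : pvSel fs k = [] := by
  apply List.filter_eq_nil_iff.mpr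
  intro f hf
  simp only [beq_iff_eq]
  exact fun he => h (he ▸ List.mem_map_of_mem hf)

theorem pvDict_eq_mk {κ ν : Type} (d : PySem.Dict κ ν) : d = PySem.Dict.mk d.items := rfl

theorem pvFold_items (fs : List (List (String × String)))
    (h : ∀ f ∈ fs, (List.lookup "rule_id" f).isSome) :
    (fs.foldl pvStepA PySem.Dict.empty) = PySem.Dict.mk (pvOut fs) := by
  induction fs using List.reverseRecOn with
  | nil => rfl
  | append_singleton fs f ih =>
      have hf : (List.lookup "rule_id" f).isSome := h f (by simp)
      have hfs : ∀ g ∈ fs, (List.lookup "rule_id" g).isSome := fun g hg => h g (by simp [hg])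
      rw [List.foldl_append, List.foldl_cons, List.foldl_nil, ih hfs, pvStepA_eq _ _ hf]
      have hgetD : (PySem.Dict.mk (pvOut fs)).getD (pvLabel f) [] = pvSel fs (pvLabel f) := by
        by_cases hkL : pvLabel f ∈ fs.map pvLabel
        · simp only [PySem.Dict.getD, pvGet?_out, if_pos hkL, Option.getD_some]
        · simp only [PySem.Dict.getD, pvGet?_out, if_neg hkL, Option.getD_none,
            pvSel_nil_of_not_mem hkL]
      rw [hgetD]
      by_cases hkL : pvLabel f ∈ fs.map pvLabel
      · -- existing key: overwrite in place
        have hcont : (PySem.Dict.mk (pvOut fs)).contains (pvLabel f) = true := by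
          rw [pvContains_out]; exact decide_eq_true hkL
        have hfinal : ((PySem.Dict.mk (pvOut fs)).insert (pvLabel f)
            (pvSel fs (pvLabel f) ++ [f])).items = pvOut (fs ++ [f]) := by
          rw [PySem.Dict.items_insert_of_contains _ _ hcont]
          show List.map _ (pvOut fs) = _
          simp only [pvOut, List.map_append, List.map_cons, List.map_nil, List.map_map]
          rw [pvDedup_append, if_pos hkL]
          apply List.map_congr_left
          intro lab hlab
          simp only [Function.comp_def]
          by_cases he : lab = pvLabel f
          · subst he; simp [pvSel_append]
          · have hb : (lab == pvLabel f) = false := beq_eq_false_iff_ne.mpr he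
            simp [hb, pvSel_append, beq_eq_false_iff_ne.mpr (Ne.symm he)]
        exact (pvDict_eq_mk _).trans (congrArg PySem.Dict.mk hfinal)
      · -- new key: append at the end
        have hcont : (PySem.Dict.mk (pvOut fs)).contains (pvLabel f) = false := by
          rw [pvContains_out]; exact decide_eq_false hkL
        have hfinal : ((PySem.Dict.mk (pvOut fs)).insert (pvLabel f)
            (pvSel fs (pvLabel f) ++ [f])).items = pvOut (fs ++ [f]) := by
          rw [PySem.Dict.items_insert_of_not_contains _ _ hcont, pvSel_nil_of_not_mem hkL]
          simp only [pvOut, List.map_append, List.map_cons, List.map_nil]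
          rw [pvDedup_append, if_neg hkL, List.map_append]
          congr 1
          · apply List.map_congr_left
            intro lab hlab
            have hlabL := (PySem.List.mem_dedup _ _).mp hlab
            have hb : (pvLabel f == lab) = false :=
              beq_eq_false_iff_ne.mpr (fun he => hkL (he ▸ hlabL))
            simp [pvSel_append, hb]
          · simp [pvSel_append, pvSel_nil_of_not_mem hkL]
        exact (pvDict_eq_mk _).trans (congrArg PySem.Dict.mk hfinal)

-- ===== VERDICT (by name: the statement is the Claim_ definition above) =====
theorem categorize_findings_by_section_spec : Claim_equal_categorize_findings_by_section := by
  intro findings _ hpre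
  unfold Spec_categorize_findings_by_section
  have hall : ∀ f ∈ findings, (List.lookup "rule_id" f).isSome := by
    intro f hf
    have := List.all_eq_true.mp hpre f hf
    simpa using this
  rw [categorize_findings_by_section, pvFold_items findings hall, pvAlt_eq]
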